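-- pv_equiv track=rewrite | github.com/patrick25076/chess-vision-ai | main.py | dict_to_fen
-- ===== SOURCE A (Python) =====
-- def dict_to_fen(dictionary_of_pieces , white_moves):
--     """Converting the dictionary with pieces and their square positions to FEN notation
--
--     Parameters:
--     dictionary_of_pieces (dict) -- dictionary of pieces and their square positions
--     white_moves (bool) -- True if white moves , False if black moves
--
--     Returns:
--     fen (str) -- FEN notation of the chessboard
--     link (str) -- Lichess link to analyze the game from that position
--     """
--
--     fen=''
--     c=0
--     for i in range(1,65):
--         if i in dictionary_of_pieces.keys():
--             if c>0:
--                 fen+=str(c)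
--             fen+=dictionary_of_pieces[i]
--             c=0
--         else:
--             c=c+1
--         if i%8==0:
--             if c>0:
--                 fen+=str(c)
--             c=0
--             fen+=('/')
--     fen=fen[:-1]
--     if white_moves==True:
--         fen_link=fen+"%20w"
--         fen+=' w - - 0 1'
--     else:
--         fen_link=fen+r"%20b"
--         fen+=' b - - 0 1'
--     link='https://lichess.org/analysis/standard/'+fen_link
--     return fen, link
-- ===== SOURCE B (Python) =====
-- def dict_to_fen(dictionary_of_pieces, white_moves):
--     """Piece-driven rewrite: instead of scanning all 64 squares with an
--     empty-square counter, iterate only over the pieces of each rank in sorted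
--     order and compute the empty-run digits arithmetically from the gaps
--     between consecutive occupied files."""
--     ranks = []
--     for r in range(8):
--         keys = sorted(k for k in dictionary_of_pieces if r * 8 < k <= r * 8 + 8)
--         rank = ''
--         prev = -1
--         for k in keys:
--             f = k - r * 8 - 1
--             gap = f - prev - 1
--             if gap > 0:
--                 rank += str(gap)
--             rank += dictionary_of_pieces[k]
--             prev = f
--         if 7 - prev > 0:
--             rank += str(7 - prev)
--         ranks.append(rank)
--     fen = '/'.join(ranks)
--     if white_moves == True:
--         fen_link = fen + "%20w"
--         fen += ' w - - 0 1'
--     else: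
--         fen_link = fen + r"%20b"
--         fen += ' b - - 0 1'
--     link = 'https://lichess.org/analysis/standard/' + fen_link
--     return fen, link
-- ===== Notes on version B (the rewrite author's own statement) =====
-- stated objective: alternative
-- what changed: B iterates only over the dict's pieces: per rank it sorts the keys falling in that rank and emits the empty-run digits arithmetically from gaps between consecutive occupied files, then '/'.joins the eight rank strings, instead of A's flat 64-square scan with an incrementing empty counter, i%8 boundary flushes and a trailing-slash trim.
import Mathlib
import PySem

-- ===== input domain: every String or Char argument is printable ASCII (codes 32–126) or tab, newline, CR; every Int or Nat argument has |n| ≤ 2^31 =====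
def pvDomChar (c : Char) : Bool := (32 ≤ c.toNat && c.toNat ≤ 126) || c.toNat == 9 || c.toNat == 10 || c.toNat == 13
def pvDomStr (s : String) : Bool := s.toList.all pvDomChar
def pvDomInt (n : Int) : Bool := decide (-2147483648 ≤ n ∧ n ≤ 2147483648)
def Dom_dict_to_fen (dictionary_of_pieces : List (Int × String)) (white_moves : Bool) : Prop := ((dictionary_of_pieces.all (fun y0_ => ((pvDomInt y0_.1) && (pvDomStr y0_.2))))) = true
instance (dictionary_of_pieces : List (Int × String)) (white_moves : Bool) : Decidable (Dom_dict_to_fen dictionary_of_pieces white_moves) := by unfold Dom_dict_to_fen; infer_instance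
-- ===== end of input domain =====

-- B builds the FEN from the pieces themselves: per rank it sorts the keys of that rank and
-- derives the empty-run digits from gaps between occupied files, then '/'.joins the ranks,
-- instead of A's flat 64-square scan with an empty counter and a trailing-slash trim
-- (objective: alternative decomposition; equal return value).

-- ===== PORT A =====
-- the body of A's `for i in range(1,65)` loop
def pvStepA (d : PySem.Dict Int String) (st : String × Int) (i : Int) : String × Int :=
  let fen := st.1
  let c := st.2
  let (fen, c) :=
    if d.contains i then
      ((if c > 0 then fen ++ PySem.Int.toStr c else fen) ++ d.getD i "", (0 : Int))
    else
      (fen, c + 1)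
  if PySem.Int.mod i 8 = 0 then
    ((if c > 0 then fen ++ PySem.Int.toStr c else fen) ++ "/", (0 : Int))
  else
    (fen, c)

def dict_to_fen (dictionary_of_pieces : List (Int × String)) (white_moves : Bool) : String × String :=
  let d := PySem.Dict.ofList dictionary_of_pieces
  let fc := (PySem.List.pyRange 1 65 1).foldl (pvStepA d) ("", 0)
  let fen := PySem.Str.slice fc.1 none (some (-1))
  if white_moves == true then
    let fen_link := fen ++ "%20w"
    let fen := fen ++ " w - - 0 1"
    (fen, "https://lichess.org/analysis/standard/" ++ fen_link)
  else
    let fen_link := fen ++ "%20b"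
    let fen := fen ++ " b - - 0 1"
    (fen, "https://lichess.org/analysis/standard/" ++ fen_link)

-- ===== PORT B =====
-- one rank of B: sorted keys of that rank, gap arithmetic between occupied files
-- (d.getD k "" ports B's `dictionary_of_pieces[k]`: k comes from the key list, so it is present)
def pvRankB (d : PySem.Dict Int String) (r : Int) : String :=
  let keys := PySem.List.sorted
      ((d.keys).filter (fun k => decide (r * 8 < k) && decide (k ≤ r * 8 + 8))) (fun x => x) false
  let rp := keys.foldl (fun (st : String × Int) k =>
      let f := k - r * 8 - 1
      let gap := f - st.2 - 1
      ((if gap > 0 then st.1 ++ PySem.Int.toStr gap else st.1) ++ d.getD k "", f))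
    ("", -1)
  if 7 - rp.2 > 0 then rp.1 ++ PySem.Int.toStr (7 - rp.2) else rp.1

def dict_to_fen_alt (dictionary_of_pieces : List (Int × String)) (white_moves : Bool) : String × String :=
  let d := PySem.Dict.ofList dictionary_of_pieces
  let fen := PySem.Str.join "/" ((PySem.List.pyRange 0 8 1).map (pvRankB d))
  if white_moves == true then
    let fen_link := fen ++ "%20w"
    let fen := fen ++ " w - - 0 1"
    (fen, "https://lichess.org/analysis/standard/" ++ fen_link)
  else
    let fen_link := fen ++ "%20b"
    let fen := fen ++ " b - - 0 1"
    (fen, "https://lichess.org/analysis/standard/" ++ fen_link)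

-- ===== PRECONDITION & SPEC =====
def Spec_dict_to_fen (dictionary_of_pieces : List (Int × String)) (white_moves : Bool) (out : String × String) : Prop := out = dict_to_fen_alt dictionary_of_pieces white_moves
instance (dictionary_of_pieces : List (Int × String)) (white_moves : Bool) (out : String × String) : Decidable (Spec_dict_to_fen dictionary_of_pieces white_moves out) := by unfold Spec_dict_to_fen; infer_instance

-- ===== CLAIM (what is proved, stated in full; the proofs are below) =====
def Claim_equal_dict_to_fen : Prop := ∀ (dictionary_of_pieces : List (Int × String)) (white_moves : Bool), Dom_dict_to_fen dictionary_of_pieces white_moves → Spec_dict_to_fen dictionary_of_pieces white_moves (dict_to_fen dictionary_of_pieces white_moves)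

-- ===== LEMMAS AND PROOFS =====

-- proof-side intermediate: A's per-square step restricted to one rank (counter scan)
def pvStepC (g : Int → Option String) (st : String × Int) (f : Int) : String × Int :=
  match g f with
  | some p => ((if st.2 > 0 then st.1 ++ PySem.Int.toStr st.2 else st.1) ++ p, 0)
  | none => (st.1, st.2 + 1)

-- proof-side intermediate: B's gap step over a file index
def pvStepG (g : Int → Option String) (st : String × Int) (f : Int) : String × Int :=
  ((if f - st.2 - 1 > 0 then st.1 ++ PySem.Int.toStr (f - st.2 - 1) else st.1) ++ (g f).getD "", f)

-- counter scan of one rank, flushed at the end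
def pvCScan (g : Int → Option String) (r : Int) : String :=
  let rc := (PySem.List.pyRange 0 8 1).foldl (fun st f => pvStepC g st (r * 8 + f + 1)) ("", 0)
  if rc.2 > 0 then rc.1 ++ PySem.Int.toStr rc.2 else rc.1

-- the heart: counter scan = gap scan, by induction on the number of remaining files
lemma scan_core (g : Int → Option String) :
    ∀ (n : Nat) (start c : Int), 0 ≤ c → ∀ (s : String),
      (let cf := (PySem.List.pyRange start (start + n) 1).foldl (pvStepC g) (s, c);
       if cf.2 > 0 then cf.1 ++ PySem.Int.toStr cf.2 else cf.1)
      =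
      (let gf := ((PySem.List.pyRange start (start + n) 1).filter
                    (fun f => (g f).isSome)).foldl (pvStepG g) (s, start - 1 - c);
       if start + n - 1 - gf.2 > 0 then gf.1 ++ PySem.Int.toStr (start + n - 1 - gf.2) else gf.1) := by
  intro n
  induction n with
  | zero =>
      intro start c hc s
      have hnil : PySem.List.pyRange start (start + ((0:Nat):Int)) 1 = [] := by
        simp [pysem]
      rw [hnil]
      simp only [List.filter_nil, List.foldl_nil]
      have h1 : start + ((0:Nat):Int) - 1 - (start - 1 - c) = c := by push_cast; ring
      rw [h1]
  | succ n ih =>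
      intro start c hc s
      have hcons : PySem.List.pyRange start (start + ((n+1:Nat):Int)) 1 =
          start :: PySem.List.pyRange (start + 1) ((start + 1) + ((n:Nat):Int)) 1 := by
        rw [PySem.List.pyRange_one_cons (by push_cast; omega)]
        congr 1
        push_cast; ring
      rw [hcons]
      have hbound : start + ((n+1:Nat):Int) - 1 = (start + 1) + ((n:Nat):Int) - 1 := by
        push_cast; ring
      cases hg : g start with
      | none =>
          simp only [List.filter_cons, List.foldl_cons, pvStepC, hg, Option.isSome_none,
            Bool.false_eq_true, if_false, cond_false]
          have := ih (start + 1) (c + 1) (by omega) s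
          simp only at this
          rw [hbound]
          have hprev : start - 1 - c = (start + 1) - 1 - (c + 1) := by ring
          rw [hprev]
          exact this
      | some p =>
          simp only [List.filter_cons, List.foldl_cons, pvStepC, hg, Option.isSome_some,
            if_true, cond_true]
          have hgap : start - (start - 1 - c) - 1 = c := by ring
          simp only [pvStepG, hg, hgap, Option.getD_some]
          have := ih (start + 1) 0 (by omega) ((if c > 0 then s ++ PySem.Int.toStr c else s) ++ p)
          simp only at this
          rw [hbound]
          rw [show (start + 1 - 1 - (0:Int)) = start from by ring] at this
          exact this

-- a non-boundary A-step is a counter step acting under the accumulated prefix s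
lemma stepA_eq_stepC (d : PySem.Dict Int String) (s rank : String) (c i : Int)
    (h : ¬ (8:Int) ∣ i) :
    pvStepA d (s ++ rank, c) i =
      (s ++ (pvStepC (d.get?) (rank, c) i).1, (pvStepC (d.get?) (rank, c) i).2) := by
  unfold pvStepA pvStepC
  rw [PySem.Dict.contains_eq_isSome_get?, PySem.Dict.getD_eq_get?_getD]
  cases hg : d.get? i with
  | none => simp [h]
  | some p => by_cases hc : c > 0 <;> simp [h, hc, String.append_assoc]

-- a boundary A-step flushes the counter like the end-of-rank flush and appends '/'
lemma stepA_boundary (d : PySem.Dict Int String) (s rank : String) (c i : Int)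
    (h : (8:Int) ∣ i) :
    pvStepA d (s ++ rank, c) i =
      (s ++ (if (pvStepC (d.get?) (rank, c) i).2 > 0
             then (pvStepC (d.get?) (rank, c) i).1 ++ PySem.Int.toStr (pvStepC (d.get?) (rank, c) i).2
             else (pvStepC (d.get?) (rank, c) i).1) ++ "/", 0) := by
  unfold pvStepA pvStepC
  rw [PySem.Dict.contains_eq_isSome_get?, PySem.Dict.getD_eq_get?_getD]
  cases hg : d.get? i with
  | none =>
      by_cases hc : c + 1 > 0 <;> simp [h, hc, String.append_assoc]
  | some p =>
      by_cases hc : c > 0 <;> simp [h, hc, String.append_assoc]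

-- A's step over keys none of which end a rank tracks the counter step under the prefix s
lemma foldA_no_boundary (d : PySem.Dict Int String) (ks : List Int)
    (h : ∀ k ∈ ks, ¬ (8:Int) ∣ k) (s : String) :
    ∀ (rank : String) (c : Int),
      ks.foldl (pvStepA d) (s ++ rank, c) =
        (s ++ (ks.foldl (pvStepC (d.get?)) (rank, c)).1, (ks.foldl (pvStepC (d.get?)) (rank, c)).2) := by
  induction ks with
  | nil => intro rank c; simp
  | cons k ks ih =>
      intro rank c
      simp only [List.foldl_cons]
      rw [stepA_eq_stepC d s rank c k (h k (by simp))]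
      exact ih (fun x hx => h x (by simp [hx])) _ _

-- folding A's step over one whole rank block appends that rank's counter scan and a '/'
lemma rank_block (d : PySem.Dict Int String) (r : Int) (s : String) :
    (([0,1,2,3,4,5,6,7] : List Int).map (fun f => r * 8 + f + 1)).foldl
        (pvStepA d) (s, 0) = (s ++ pvCScan (d.get?) r ++ "/", 0) := by
  have hsplit : (([0,1,2,3,4,5,6,7] : List Int).map (fun f => r * 8 + f + 1)) =
      (([0,1,2,3,4,5,6] : List Int).map (fun f => r * 8 + f + 1)) ++ [r * 8 + 7 + 1] := by
    simp
  have h7 : ∀ k ∈ (([0,1,2,3,4,5,6] : List Int).map (fun f => r * 8 + f + 1)), ¬ (8:Int) ∣ k := by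
    intro k hk
    simp only [List.mem_map, List.mem_cons] at hk
    obtain ⟨f, hf, rfl⟩ := hk
    rintro ⟨t, ht⟩
    rcases hf with rfl | rfl | rfl | rfl | rfl | rfl | rfl | hf
    all_goals first | omega | cases hf
  have hdvd : (8:Int) ∣ (r * 8 + 7 + 1) := ⟨r + 1, by ring⟩
  rw [hsplit, List.foldl_append]
  rw [show ((s, (0:Int)) : String × Int) = (s ++ "", (0:Int)) by rw [String.append_empty]]
  rw [foldA_no_boundary d _ h7 s "" 0]
  simp only [List.foldl_cons, List.foldl_nil]
  rw [stepA_boundary d s _ _ _ hdvd]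
  have hB : pvCScan (d.get?) r =
      (if (pvStepC (d.get?) ((([0,1,2,3,4,5,6] : List Int).map (fun f => r * 8 + f + 1)).foldl
              (pvStepC (d.get?)) ("", 0)) (r * 8 + 7 + 1)).2 > 0
       then (pvStepC (d.get?) ((([0,1,2,3,4,5,6] : List Int).map (fun f => r * 8 + f + 1)).foldl
              (pvStepC (d.get?)) ("", 0)) (r * 8 + 7 + 1)).1 ++
            PySem.Int.toStr (pvStepC (d.get?) ((([0,1,2,3,4,5,6] : List Int).map (fun f => r * 8 + f + 1)).foldl
              (pvStepC (d.get?)) ("", 0)) (r * 8 + 7 + 1)).2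
       else (pvStepC (d.get?) ((([0,1,2,3,4,5,6] : List Int).map (fun f => r * 8 + f + 1)).foldl
              (pvStepC (d.get?)) ("", 0)) (r * 8 + 7 + 1)).1) := by
    unfold pvCScan
    rw [show PySem.List.pyRange 0 8 1 = ([0,1,2,3,4,5,6,7] : List Int) from by decide]
    rw [List.foldl_map]
    simp only [List.foldl_cons, List.foldl_nil]
  rw [hB]

-- the 64-square loop of A produces the eight counter-scan rank strings each followed by '/'
lemma foldA_eq_ranks (d : PySem.Dict Int String) :
    (PySem.List.pyRange 1 65 1).foldl (pvStepA d) ("", 0) =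
      (pvCScan (d.get?) 0 ++ "/" ++ (pvCScan (d.get?) 1 ++ "/") ++ (pvCScan (d.get?) 2 ++ "/")
        ++ (pvCScan (d.get?) 3 ++ "/") ++ (pvCScan (d.get?) 4 ++ "/") ++ (pvCScan (d.get?) 5 ++ "/")
        ++ (pvCScan (d.get?) 6 ++ "/") ++ (pvCScan (d.get?) 7 ++ "/"), 0) := by
  have hsplit : PySem.List.pyRange 1 65 1 =
      (([0,1,2,3,4,5,6,7] : List Int).map (fun f => 0 * 8 + f + 1)) ++
      (([0,1,2,3,4,5,6,7] : List Int).map (fun f => 1 * 8 + f + 1)) ++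
      (([0,1,2,3,4,5,6,7] : List Int).map (fun f => 2 * 8 + f + 1)) ++
      (([0,1,2,3,4,5,6,7] : List Int).map (fun f => 3 * 8 + f + 1)) ++
      (([0,1,2,3,4,5,6,7] : List Int).map (fun f => 4 * 8 + f + 1)) ++
      (([0,1,2,3,4,5,6,7] : List Int).map (fun f => 5 * 8 + f + 1)) ++
      (([0,1,2,3,4,5,6,7] : List Int).map (fun f => 6 * 8 + f + 1)) ++
      (([0,1,2,3,4,5,6,7] : List Int).map (fun f => 7 * 8 + f + 1)) := by decide
  rw [hsplit]
  simp only [List.foldl_append]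
  rw [rank_block d 0, rank_block d 1, rank_block d 2, rank_block d 3,
      rank_block d 4, rank_block d 5, rank_block d 6, rank_block d 7]
  simp [String.append_assoc]

-- B's sorted key list of rank r is the in-order list of occupied squares of that rank
lemma sorted_keys_eq (d : PySem.Dict Int String) (hnd : d.keys.Nodup) (r : Int) :
    PySem.List.sorted
        ((d.keys).filter (fun k => decide (r * 8 < k) && decide (k ≤ r * 8 + 8))) (fun x => x) false
      = ((([0,1,2,3,4,5,6,7] : List Int).filter
            (fun f => (d.get? (r * 8 + f + 1)).isSome)).map (fun f => r * 8 + f + 1)) := by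
  apply PySem.List.sorted_eq_of_perm_of_pairwise_lt
  · rw [List.perm_ext_iff_of_nodup]
    · intro a
      constructor
      · intro ha
        obtain ⟨f, hf, rfl⟩ := List.mem_map.mp ha
        obtain ⟨hf8, hq⟩ := List.mem_filter.mp hf
        have hb : 0 ≤ f ∧ f ≤ 7 := by
          simp only [List.mem_cons, List.not_mem_nil, or_false] at hf8
          rcases hf8 with rfl | rfl | rfl | rfl | rfl | rfl | rfl | rfl <;> omega
        refine List.mem_filter.mpr ⟨?_, ?_⟩
        · exact (PySem.Dict.contains_iff_mem_keys d _).mp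
            (by rw [PySem.Dict.contains_eq_isSome_get?]; exact hq)
        · simp only [Bool.and_eq_true, decide_eq_true_eq]
          omega
      · intro ha
        obtain ⟨hk, hP⟩ := List.mem_filter.mp ha
        simp only [Bool.and_eq_true, decide_eq_true_eq] at hP
        refine List.mem_map.mpr ⟨a - r * 8 - 1, List.mem_filter.mpr ⟨?_, ?_⟩, by ring⟩
        · simp only [List.mem_cons, List.not_mem_nil, or_false]
          omega
        · have : d.get? (r * 8 + (a - r * 8 - 1) + 1) = d.get? a := by congr 1; ring
          rw [this]
          rw [← PySem.Dict.contains_eq_isSome_get?]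
          exact (PySem.Dict.contains_iff_mem_keys d a).mpr hk
    · exact (List.Nodup.filter _ (by decide)).map (fun a b h => by omega)
    · exact hnd.filter _
  · have h07 : ([0,1,2,3,4,5,6,7] : List Int).Pairwise (· < ·) := by decide
    exact (h07.filter _).map _ (fun {a b} h => by omega)

-- per rank: A's counter scan equals B's gap scan over the sorted occupied squares
lemma rank_eq (d : PySem.Dict Int String) (hnd : d.keys.Nodup) (r : Int) :
    pvCScan (d.get?) r = pvRankB d r := by
  have H := scan_core (fun f => d.get? (r * 8 + f + 1)) 8 0 0 (by omega) ""
  simp only at H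
  rw [show ((0:Int) + ((8:Nat):Int)) = 8 from by norm_num] at H
  simp only [show ∀ x : Int, (8:Int) - 1 - x = 7 - x from fun x => by ring,
    show ((0:Int) - 1 - 0) = -1 from by norm_num] at H
  unfold pvCScan pvRankB
  dsimp only []
  rw [sorted_keys_eq d hnd r, List.foldl_map]
  rw [show PySem.List.pyRange 0 8 1 = ([0,1,2,3,4,5,6,7] : List Int) from by decide] at H ⊢
  have hstep : ∀ (acc : String × Int) (x : Int),
      x ∈ (([0,1,2,3,4,5,6,7] : List Int).filter (fun f => (d.get? (r * 8 + f + 1)).isSome)) →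
      ((if r * 8 + x + 1 - r * 8 - 1 - acc.2 - 1 > 0
        then acc.1 ++ PySem.Int.toStr (r * 8 + x + 1 - r * 8 - 1 - acc.2 - 1) else acc.1)
          ++ d.getD (r * 8 + x + 1) "", r * 8 + x + 1 - r * 8 - 1)
        = pvStepG (fun f => d.get? (r * 8 + f + 1)) acc x := by
    intro acc x _
    simp only [pvStepG, PySem.Dict.getD_eq_get?_getD,
      show r * 8 + x + 1 - r * 8 - 1 = x from by ring]
  rw [PySem.List.foldl_congr_mem
      (([0,1,2,3,4,5,6,7] : List Int).filter (fun f => (d.get? (r * 8 + f + 1)).isSome))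
      (fun (x : String × Int) y =>
        ((if r * 8 + y + 1 - r * 8 - 1 - x.2 - 1 > 0
          then x.1 ++ PySem.Int.toStr (r * 8 + y + 1 - r * 8 - 1 - x.2 - 1) else x.1)
            ++ d.getD (r * 8 + y + 1) "", r * 8 + y + 1 - r * 8 - 1))
      (pvStepG (fun f => d.get? (r * 8 + f + 1))) ("", -1) hstep]
  exact H

-- trimming the trailing '/' from A's accumulated string yields B's '/'.join
lemma fen_core_eq (d : PySem.Dict Int String) (hnd : d.keys.Nodup) :
    PySem.Str.slice ((PySem.List.pyRange 1 65 1).foldl (pvStepA d) ("", 0)).1 none (some (-1)) =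
      PySem.Str.join "/" ((PySem.List.pyRange 0 8 1).map (pvRankB d)) := by
  rw [foldA_eq_ranks]
  apply String.toList_inj.mp
  rw [PySem.Str.slice_to_neg_one]
  rw [show PySem.List.pyRange 0 8 1 = ([0,1,2,3,4,5,6,7] : List Int) from by decide]
  simp only [List.map_cons, List.map_nil, PySem.Str.toList_join,
    PySem.Chars.join_cons_cons, PySem.Chars.join_singleton]
  rw [← rank_eq d hnd 0, ← rank_eq d hnd 1, ← rank_eq d hnd 2, ← rank_eq d hnd 3,
      ← rank_eq d hnd 4, ← rank_eq d hnd 5, ← rank_eq d hnd 6, ← rank_eq d hnd 7]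
  simp only [String.toList_append, List.append_assoc]
  rw [show ∀ l : List Char, l ++ "/".toList = l ++ ['/'] from fun l => rfl]
  simp only [← List.append_assoc, List.dropLast_concat]

-- ===== VERDICT (by name: the statement is the Claim_ definition above) =====
theorem dict_to_fen_spec : Claim_equal_dict_to_fen := by
  intro dictionary_of_pieces white_moves _
  unfold Spec_dict_to_fen dict_to_fen dict_to_fen_alt
  simp only []
  rw [fen_core_eq _ (PySem.Dict.nodup_keys_ofList dictionary_of_pieces)]
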